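-- pv_equiv track=rewrite | github.com/ieee-vgtc/vgtc-admin | data.py | inner_join
-- ===== SOURCE A (Python) =====
-- def inner_join(lst1, lst2, column):
--     result = []
--     index_lst2 = dict((v[column], v) for v in lst2)
--     for el in lst1:
--         if el[column] in index_lst2:
--             row = el.copy()
--             row.update(index_lst2[el[column]])
--             result.append(row)
--     return result
-- ===== SOURCE B (Python) =====
-- def inner_join(lst1, lst2, column):
--     result = []
--     for el in lst1:
--         key = el[column]
--         match = None
--         for v in lst2:
--             if v[column] == key:
--                 match = v
--         if match is not None:
--             row = el.copy()
--             row.update(match)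
--             result.append(row)
--     return result
-- ===== Notes on version B (the rewrite author's own statement) =====
-- stated objective: alternative
-- what changed: Replaces the precomputed dict index over lst2 with a nested-loop scan that keeps the last matching dict of lst2 for each element of lst1.
import Mathlib
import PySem

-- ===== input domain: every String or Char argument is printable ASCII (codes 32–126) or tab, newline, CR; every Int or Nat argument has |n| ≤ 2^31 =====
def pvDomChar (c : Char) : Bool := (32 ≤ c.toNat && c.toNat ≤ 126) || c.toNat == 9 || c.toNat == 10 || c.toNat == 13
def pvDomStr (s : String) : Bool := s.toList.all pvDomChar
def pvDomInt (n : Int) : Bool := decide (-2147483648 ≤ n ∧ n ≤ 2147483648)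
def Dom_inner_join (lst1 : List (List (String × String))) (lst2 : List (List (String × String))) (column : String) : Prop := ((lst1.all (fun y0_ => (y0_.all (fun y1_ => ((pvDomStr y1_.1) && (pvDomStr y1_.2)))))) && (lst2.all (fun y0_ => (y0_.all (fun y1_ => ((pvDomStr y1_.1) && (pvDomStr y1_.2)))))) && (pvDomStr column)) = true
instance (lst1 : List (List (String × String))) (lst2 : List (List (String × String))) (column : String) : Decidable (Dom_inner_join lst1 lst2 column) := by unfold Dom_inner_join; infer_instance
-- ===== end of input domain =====

-- B replaces A's precomputed hash index over lst2 by a direct nested scan of lst2 (keeping the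
-- last match) for each element of lst1; same outputs, alternative decomposition, not faster.

-- ===== PORT A =====
-- A: index_lst2 = dict((v[column], v) for v in lst2); then one pass over lst1 looking the key up.
-- el[column]/v[column] may raise KeyError; Pre_ excludes that, so the port reads it with getD "".
def inner_join (lst1 : List (List (String × String))) (lst2 : List (List (String × String))) (column : String) : List (List (String × String)) :=
  let index_lst2 : PySem.Dict String (PySem.Dict String String) :=
    lst2.foldl (fun acc v =>
      let vd := PySem.Dict.ofList v
      acc.insert (vd.getD column "") vd) PySem.Dict.empty
  lst1.foldl (fun result el =>
    let ed := PySem.Dict.ofList el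
    if index_lst2.contains (ed.getD column "") then
      let row := ed.update (index_lst2.getD (ed.getD column "") PySem.Dict.empty).items
      result ++ [row.items]
    else result) []

-- ===== PORT B =====
-- B: for each el, scan lst2 keeping the LAST v with v[column] == el[column]; no index.
def inner_join_alt (lst1 : List (List (String × String))) (lst2 : List (List (String × String))) (column : String) : List (List (String × String)) :=
  lst1.foldl (fun result el =>
    let ed := PySem.Dict.ofList el
    let key := ed.getD column ""
    let m := lst2.foldl (fun acc v =>
      let vd := PySem.Dict.ofList v
      if vd.getD column "" == key then some vd else acc)
      (none : Option (PySem.Dict String String))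
    match m with
    | some vd => result ++ [(ed.update vd.items).items]
    | none => result) []

-- ===== PRECONDITION & SPEC =====
-- Pre_ excludes exactly the inputs where Python A raises KeyError: some dict in lst2, or some
-- dict in lst1, that lacks the key `column`.
def Pre_inner_join (lst1 : List (List (String × String))) (lst2 : List (List (String × String))) (column : String) : Prop :=
  (lst1.all (fun d => d.any (fun p => p.1 == column)) &&
   lst2.all (fun d => d.any (fun p => p.1 == column))) = true
instance (lst1 : List (List (String × String))) (lst2 : List (List (String × String))) (column : String) : Decidable (Pre_inner_join lst1 lst2 column) := by unfold Pre_inner_join; infer_instance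
def pvWitness_inner_join : (List (List (String × String))) × (List (List (String × String))) × String :=
  ([[("c", "1"), ("x", "a")], [("c", "2")]], ([[("c", "2"), ("y", "b")], [("c", "2"), ("y", "B")]], "c"))

def Spec_inner_join (lst1 : List (List (String × String))) (lst2 : List (List (String × String))) (column : String) (out : List (List (String × String))) : Prop := out = inner_join_alt lst1 lst2 column
instance (lst1 : List (List (String × String))) (lst2 : List (List (String × String))) (column : String) (out : List (List (String × String))) : Decidable (Spec_inner_join lst1 lst2 column out) := by unfold Spec_inner_join; infer_instance

-- ===== CLAIM (what is proved, stated in full; the proofs are below) =====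
def Claim_equal_inner_join : Prop := ∀ (lst1 : List (List (String × String))) (lst2 : List (List (String × String))) (column : String), Dom_inner_join lst1 lst2 column → Pre_inner_join lst1 lst2 column → Spec_inner_join lst1 lst2 column (inner_join lst1 lst2 column)
-- ===== LEMMAS AND PROOFS =====

-- A's index lookup at any key equals B's last-match scan of lst2 at that key.
lemma index_get?_eq_scan (lst2 : List (List (String × String))) (column key : String)
    (d0 : PySem.Dict String (PySem.Dict String String)) :
    (lst2.foldl (fun acc v =>
        let vd := PySem.Dict.ofList v
        acc.insert (vd.getD column "") vd) d0).get? key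
    = lst2.foldl (fun acc v =>
        let vd := PySem.Dict.ofList v
        if vd.getD column "" == key then some vd else acc) (d0.get? key) := by
  induction lst2 generalizing d0 with
  | nil => rfl
  | cons v t ih =>
    simp only [List.foldl_cons]
    rw [ih]
    by_cases h : (PySem.Dict.ofList v).getD column "" = key
    · simp [h, PySem.Dict.get?_insert_self]
    · have hne : key ≠ (PySem.Dict.ofList v).getD column "" := fun hk => h hk.symm
      simp [h, PySem.Dict.get?_insert_of_ne _ _ hne]

theorem inner_join_eq_alt (lst1 lst2 : List (List (String × String))) (column : String) :
    inner_join lst1 lst2 column = inner_join_alt lst1 lst2 column := by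
  unfold inner_join inner_join_alt
  dsimp only
  congr 1
  funext result el
  have h := index_get?_eq_scan lst2 column ((PySem.Dict.ofList el).getD column "") PySem.Dict.empty
  rw [PySem.Dict.get?_empty] at h
  cases hm : lst2.foldl (fun acc v =>
      let vd := PySem.Dict.ofList v
      if vd.getD column "" == (PySem.Dict.ofList el).getD column "" then some vd else acc)
      (none : Option (PySem.Dict String String)) with
  | none =>
    rw [hm] at h
    rw [PySem.Dict.getD_eq_get?_getD (PySem.Dict.ofList el) column ""] at h ⊢
    rw [PySem.Dict.contains_eq_isSome_get?, h]
    simp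
  | some vd =>
    rw [hm] at h
    rw [PySem.Dict.getD_eq_get?_getD (PySem.Dict.ofList el) column ""] at h ⊢
    rw [PySem.Dict.contains_eq_isSome_get?, PySem.Dict.getD_eq_get?_getD, h]
    simp

-- ===== VERDICT (by name: the statement is the Claim_ definition above) =====
theorem inner_join_spec : Claim_equal_inner_join := by
  intro lst1 lst2 column _ _
  unfold Spec_inner_join
  exact inner_join_eq_alt lst1 lst2 column
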